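-- pv_equiv track=rewrite | github.com/cnm13ryan/inoculation-prompting | gcd_sycophancy/projects/followups/strict_validator_h5_ckpt/strict_checkpoint_curve.py | euclidean_valid
-- ===== SOURCE A (Python) =====
-- def euclidean_valid(steps, pair, truth):
--     if not steps or pair is None:
--         return False
--     try:
--         truth = int(truth)
--     except (TypeError, ValueError):
--         return False
--     for _, a, b, q, r in steps:
--         if b == 0 or b * q + r != a or not (0 <= r < b):
--             return False
--     for i in range(len(steps) - 1):
--         _, _, b_cur, _, r_cur = steps[i]
--         _, a_n, b_n, _, _ = steps[i + 1]
--         if a_n != b_cur or b_n != r_cur: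
--             return False
--     _, a0, b0, _, _ = steps[0]
--     try:
--         pa, pb = int(pair["a"]), int(pair["b"])
--     except (KeyError, TypeError, ValueError):
--         return False
--     if (a0, b0) != (max(pa, pb), min(pa, pb)):
--         return False
--     _, _, b_l, _, r_l = steps[-1]
--     return r_l == 0 and b_l == truth
-- ===== SOURCE B (Python) =====
-- def euclidean_valid(steps, pair, truth):
--     if not steps or pair is None:
--         return False
--     try:
--         truth = int(truth)
--     except (TypeError, ValueError):
--         return False
--     try:
--         pa, pb = int(pair["a"]), int(pair["b"])
--     except (KeyError, TypeError, ValueError):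
--         return False
--     a, b = max(pa, pb), min(pa, pb)
--     if b <= 0:
--         return False
--     expected = []
--     while True:
--         q, r = divmod(a, b)
--         expected.append((a, b, q, r))
--         if r == 0:
--             break
--         a, b = b, r
--     if len(steps) != len(expected):
--         return False
--     for (_, sa, sb, sq, sr), e in zip(steps, expected):
--         if (sa, sb, sq, sr) != e:
--             return False
--     return b == truth
-- ===== Notes on version B (the rewrite author's own statement) =====
-- stated objective: alternative
-- what changed: B reconstructs the canonical Euclidean trace from the pair with a divmod loop and compares the given steps against it field-by-field, instead of A's per-step arithmetic checks plus a separate adjacent-chaining pass over the given trace.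
import Mathlib
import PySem

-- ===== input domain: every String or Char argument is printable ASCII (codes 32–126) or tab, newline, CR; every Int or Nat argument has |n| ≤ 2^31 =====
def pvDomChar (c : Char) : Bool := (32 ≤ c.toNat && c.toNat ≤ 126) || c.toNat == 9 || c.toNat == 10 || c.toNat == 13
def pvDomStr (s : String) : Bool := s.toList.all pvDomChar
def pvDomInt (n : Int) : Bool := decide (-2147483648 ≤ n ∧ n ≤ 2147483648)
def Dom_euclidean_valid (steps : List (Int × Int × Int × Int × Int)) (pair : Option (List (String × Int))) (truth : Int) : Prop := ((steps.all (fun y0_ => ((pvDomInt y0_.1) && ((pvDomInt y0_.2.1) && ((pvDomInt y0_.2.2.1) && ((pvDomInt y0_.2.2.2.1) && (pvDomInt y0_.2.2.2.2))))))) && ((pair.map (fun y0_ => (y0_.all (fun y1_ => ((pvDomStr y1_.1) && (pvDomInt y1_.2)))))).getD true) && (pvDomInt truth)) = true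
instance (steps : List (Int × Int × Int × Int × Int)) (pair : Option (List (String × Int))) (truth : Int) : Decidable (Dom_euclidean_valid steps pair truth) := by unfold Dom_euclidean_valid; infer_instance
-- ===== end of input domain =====

-- B validates by reconstructing the canonical Euclidean trace from `pair` and comparing,
-- instead of A's field-by-field checks on the given trace; objective: alternative decomposition.
-- ===== PORT A =====
-- first loop of A: per-step arithmetic checks, early-false
def pvA_loop1 : List (Int × Int × Int × Int × Int) → Bool
  | [] => true
  | (_, a, b, q, r) :: t =>
    if b == 0 || b * q + r != a || !(decide (0 ≤ r) && decide (r < b)) then false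
    else pvA_loop1 t

-- second loop of A: chaining of consecutive steps, early-false
def pvA_loop2 : List (Int × Int × Int × Int × Int) → Bool
  | (_, _, b_cur, _, r_cur) :: (s2 :: t) =>
    if s2.2.1 != b_cur || s2.2.2.1 != r_cur then false
    else pvA_loop2 (s2 :: t)
  | _ => true

def euclidean_valid (steps : List (Int × Int × Int × Int × Int)) (pair : Option (List (String × Int))) (truth : Int) : Bool :=
  match steps, pair with
  | [], _ => false
  | _, none => false
  | s0 :: rest, some d =>
    if !pvA_loop1 (s0 :: rest) then false
    else if !pvA_loop2 (s0 :: rest) then false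
    else
      let a0 := s0.2.1
      let b0 := s0.2.2.1
      match List.lookup "a" d, List.lookup "b" d with
      | some pa, some pb =>
        if !((a0, b0) == (max pa pb, min pa pb)) then false
        else
          let last := (s0 :: rest).getLastD (0, 0, 0, 0, 0)
          last.2.2.2.2 == 0 && last.2.2.1 == truth
      | _, _ => false

-- ===== PORT B =====
-- B's while loop: returns (expected trace, final divisor b)
def pvB_loop (a b : Int) : List (Int × Int × Int × Int) × Int :=
  if h : 0 < b then
    if PySem.Int.mod a b = 0 then
      ([(a, b, PySem.Int.floordiv a b, PySem.Int.mod a b)], b)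
    else
      ((a, b, PySem.Int.floordiv a b, PySem.Int.mod a b) :: (pvB_loop b (PySem.Int.mod a b)).1,
       (pvB_loop b (PySem.Int.mod a b)).2)
  else ([], b)
termination_by b.toNat
decreasing_by
  have h1 : 0 ≤ PySem.Int.mod a b := PySem.Int.mod_nonneg a h
  have h2 : PySem.Int.mod a b < b := PySem.Int.mod_lt a h
  omega

def euclidean_valid_alt (steps : List (Int × Int × Int × Int × Int)) (pair : Option (List (String × Int))) (truth : Int) : Bool :=
  if steps.isEmpty then false
  else match pair with
  | none => false
  | some d =>
    match List.lookup "a" d with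
    | none => false
    | some pa =>
      match List.lookup "b" d with
      | none => false
      | some pb =>
      if min pa pb ≤ 0 then false
      else
        let res := pvB_loop (max pa pb) (min pa pb)
        if steps.length != res.1.length then false
        else if !((steps.zip res.1).all fun (s, e) =>
            s.2.1 == e.1 && s.2.2.1 == e.2.1 && s.2.2.2.1 == e.2.2.1 && s.2.2.2.2 == e.2.2.2) then false
        else res.2 == truth

-- ===== PRECONDITION & SPEC =====
def Spec_euclidean_valid (steps : List (Int × Int × Int × Int × Int)) (pair : Option (List (String × Int))) (truth : Int) (out : Bool) : Prop := out = euclidean_valid_alt steps pair truth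
instance (steps : List (Int × Int × Int × Int × Int)) (pair : Option (List (String × Int))) (truth : Int) (out : Bool) : Decidable (Spec_euclidean_valid steps pair truth out) := by unfold Spec_euclidean_valid; infer_instance

-- ===== CLAIM (what is proved, stated in full; the proofs are below) =====
def Claim_equal_euclidean_valid : Prop := ∀ (steps : List (Int × Int × Int × Int × Int)) (pair : Option (List (String × Int))) (truth : Int), Dom_euclidean_valid steps pair truth → Spec_euclidean_valid steps pair truth (euclidean_valid steps pair truth)

-- ===== LEMMAS AND PROOFS =====

-- A's three per-step checks plus the head anchor force q,r to be floordiv/mod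
theorem pv_qr_unique {a b q r : Int} (hb : 0 < b) (he : b * q + r = a)
    (hr0 : 0 ≤ r) (hrb : r < b) :
    q = PySem.Int.floordiv a b ∧ r = PySem.Int.mod a b := by
  have hd := PySem.Int.floordiv_mul_add_mod a b
  have h1 : 0 ≤ PySem.Int.mod a b := PySem.Int.mod_nonneg a hb
  have h2 : PySem.Int.mod a b < b := PySem.Int.mod_lt a hb
  set Q := PySem.Int.floordiv a b
  set R := PySem.Int.mod a b
  rw [mul_comm] at he
  have hq : q = Q := by
    by_contra hne
    rcases lt_or_gt_of_ne hne with h | h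
    · nlinarith [mul_le_mul_of_nonneg_right (by omega : q + 1 ≤ Q) (le_of_lt hb)]
    · nlinarith [mul_le_mul_of_nonneg_right (by omega : Q + 1 ≤ q) (le_of_lt hb)]
  subst hq
  exact ⟨rfl, by omega⟩

theorem pvB_head (a b : Int) (hb : 0 < b) :
    ∃ t, (pvB_loop a b).1 = (a, b, PySem.Int.floordiv a b, PySem.Int.mod a b) :: t := by
  rw [pvB_loop.eq_def]
  rw [dif_pos hb]
  by_cases h : PySem.Int.mod a b = 0
  · exact ⟨[], by simp [h]⟩
  · exact ⟨(pvB_loop b (PySem.Int.mod a b)).1, by simp [h]⟩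

theorem pv_getLastD {α : Type} (a b d : α) (l : List α) :
    (a :: b :: l).getLastD d = (b :: l).getLastD d := by
  rw [List.getLastD_eq_getLast?, List.getLastD_eq_getLast?, List.getLast?_cons_cons]

-- the core induction: A's checks on a nonempty trace anchored at (sa,sb), sb>0,
-- coincide with comparing against B's reconstructed trace and final divisor
theorem pv_main (truth : Int) :
    ∀ (rest : List (Int × Int × Int × Int × Int)) (x sa sb sq sr : Int), 0 < sb →
    (((pvA_loop1 ((x, sa, sb, sq, sr) :: rest) = true ∧
      pvA_loop2 ((x, sa, sb, sq, sr) :: rest) = true) ∧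
     (((x, sa, sb, sq, sr) :: rest).getLastD (0, 0, 0, 0, 0)).2.2.2.2 = 0 ∧
     (((x, sa, sb, sq, sr) :: rest).getLastD (0, 0, 0, 0, 0)).2.2.1 = truth)
    ↔ (((x, sa, sb, sq, sr) :: rest).length = (pvB_loop sa sb).1.length ∧
       (((x, sa, sb, sq, sr) :: rest).zip (pvB_loop sa sb).1).all
         (fun (s, e) => s.2.1 == e.1 && s.2.2.1 == e.2.1 && s.2.2.2.1 == e.2.2.1 && s.2.2.2.2 == e.2.2.2) = true ∧
       (pvB_loop sa sb).2 = truth)) := by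
  intro rest
  induction rest with
  | nil =>
    intro x sa sb sq sr hb
    rw [pvB_loop.eq_def]
    rw [dif_pos hb]
    set q := PySem.Int.floordiv sa sb with hqdef
    set r := PySem.Int.mod sa sb with hrdef
    have hr0 : 0 ≤ r := PySem.Int.mod_nonneg sa hb
    have hrb : r < sb := PySem.Int.mod_lt sa hb
    have heqn : sb * q + r = sa := by
      have := PySem.Int.floordiv_mul_add_mod sa sb; linarith [mul_comm q sb]
    by_cases hr : r = 0
    · rw [if_pos hr]
      simp only [pvA_loop1, pvA_loop2, List.getLastD_cons, List.getLastD_nil,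
        List.zip, List.zipWith, List.all_cons, List.all_nil, List.length_cons, List.length_nil]
      constructor
      · rintro ⟨⟨h1, -⟩, h3, h4⟩
        split at h1
        · exact absurd h1 (by simp)
        · rename_i hc
          simp only [Bool.or_eq_true, beq_iff_eq, bne_iff_ne, ne_eq, Bool.not_eq_true',
            Bool.and_eq_false_iff, decide_eq_false_iff_not, not_le, not_lt, not_or] at hc
          obtain ⟨⟨hb0, he2⟩, hsr0, hsrb⟩ := hc
          obtain ⟨hq', hr'⟩ := pv_qr_unique hb (not_not.mp he2) hsr0 hsrb
          rw [← hqdef] at hq'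
          rw [← hrdef] at hr'
          simp [hq', hr', h4]
      · rintro ⟨-, hall, htr⟩
        simp only [Bool.and_eq_true, beq_iff_eq, Bool.and_true] at hall
        obtain ⟨⟨-, hq'⟩, hr'⟩ := hall
        refine ⟨⟨?_, trivial⟩, by omega, htr⟩
        rw [if_neg (by simp [hb.ne', hq', hr', heqn, hr0, hrb])]
    · rw [if_neg hr]
      constructor
      · rintro ⟨⟨h1, -⟩, h3, h4⟩
        exfalso
        simp only [pvA_loop1] at h1
        split at h1
        · exact absurd h1 (by simp)
        · rename_i hc
          simp only [Bool.or_eq_true, beq_iff_eq, bne_iff_ne, ne_eq, Bool.not_eq_true',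
            Bool.and_eq_false_iff, decide_eq_false_iff_not, not_le, not_lt, not_or] at hc
          obtain ⟨⟨hb0, he2⟩, hsr0, hsrb⟩ := hc
          obtain ⟨hq', hr'⟩ := pv_qr_unique hb (not_not.mp he2) hsr0 hsrb
          simp only [List.getLastD_cons, List.getLastD_nil] at h3
          omega
      · rintro ⟨hlen, -, -⟩
        exfalso
        obtain ⟨t2, ht2⟩ := pvB_head sb r (by omega)
        rw [ht2] at hlen
        simp at hlen
  | cons s1 rest' ih =>
    intro x sa sb sq sr hb
    obtain ⟨y, na, nb, nq, nr⟩ := s1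
    rw [pvB_loop.eq_def]
    rw [dif_pos hb]
    set q := PySem.Int.floordiv sa sb with hqdef
    set r := PySem.Int.mod sa sb with hrdef
    have hr0 : 0 ≤ r := PySem.Int.mod_nonneg sa hb
    have hrb : r < sb := PySem.Int.mod_lt sa hb
    have heqn : sb * q + r = sa := by
      have := PySem.Int.floordiv_mul_add_mod sa sb; linarith [mul_comm q sb]
    by_cases hstep : sb * sq + sr = sa ∧ 0 ≤ sr ∧ sr < sb
    · obtain ⟨he, h0, h1⟩ := hstep
      obtain ⟨hq', hr'⟩ := pv_qr_unique hb he h0 h1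
      rw [← hqdef] at hq'
      rw [← hrdef] at hr'
      have hcond : (sb == 0 || sb * sq + sr != sa || !(decide (0 ≤ sr) && decide (sr < sb))) = false := by
        simp [hb.ne', hq', hr', heqn, hr0, hrb]
      by_cases hch : na = sb ∧ nb = sr
      · obtain ⟨hna, hnb⟩ := hch
        have hnb' : nb = r := hnb.trans hr'
        by_cases hrz : r = 0
        · -- second step has divisor 0: both sides false
          rw [if_pos hrz]
          constructor
          · rintro ⟨⟨hA1, -⟩, -, -⟩
            exfalso
            simp only [pvA_loop1, hcond] at hA1
            rw [if_neg (by simp)] at hA1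
            rw [if_pos (by simp [hnb', hrz])] at hA1
            exact absurd hA1 (by simp)
          · rintro ⟨hlen, -, -⟩
            exfalso
            simp at hlen
        · rw [if_neg hrz]
          have key := ih y sb r nq nr (by omega)
          constructor
          · rintro ⟨⟨hA1, hA2⟩, h3, h4⟩
            simp only [pvA_loop1, hcond] at hA1
            rw [if_neg (by simp)] at hA1
            simp only [pvA_loop2] at hA2
            rw [if_neg (by simp [hna, hnb])] at hA2
            rw [pv_getLastD] at h3 h4
            rw [hna, hnb'] at hA1 hA2 h3 h4
            obtain ⟨hlen, hall, hfin⟩ := key.mp ⟨⟨hA1, hA2⟩, h3, h4⟩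
            refine ⟨?_, ?_, hfin⟩
            · simp only [List.length_cons] at hlen ⊢
              omega
            · simp only [List.zip, List.zipWith, List.all_cons]
              rw [hna, hnb']
              simpa [hq', hr'] using hall
          · rintro ⟨hlen, hall, hfin⟩
            simp only [List.zip, List.zipWith, List.all_cons, Bool.and_eq_true] at hall
            obtain ⟨-, hall⟩ := hall
            rw [hna, hnb'] at hall
            obtain ⟨⟨hA1, hA2⟩, h3, h4⟩ := key.mpr
              ⟨by simp only [List.length_cons] at hlen ⊢; omega, hall, hfin⟩
            rw [← hna] at hA1 hA2 h3 h4
            rw [← hnb'] at hA1 hA2 h3 h4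
            refine ⟨⟨?_, ?_⟩, ?_, ?_⟩
            · simp only [pvA_loop1, hcond]
              rw [if_neg (by simp)]
              exact hA1
            · simp only [pvA_loop2]
              rw [if_neg (by simp [hna, hnb])]
              exact hA2
            · rw [pv_getLastD]; exact h3
            · rw [pv_getLastD]; exact h4
      · -- chain broken: both sides false
        constructor
        · rintro ⟨⟨-, hA2⟩, -, -⟩
          exfalso
          simp only [pvA_loop2] at hA2
          rw [if_pos] at hA2
          · exact absurd hA2 (by simp)
          · simp only [Bool.or_eq_true, bne_iff_ne, ne_eq]
            rcases not_and_or.mp hch with h | h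
            · exact Or.inl h
            · exact Or.inr h
        · rintro ⟨hlen, hall, -⟩
          exfalso
          by_cases hrz : r = 0
          · rw [if_pos hrz] at hlen
            simp at hlen
          · rw [if_neg hrz] at hall
            obtain ⟨t2, ht2⟩ := pvB_head sb r (by omega)
            rw [ht2] at hall
            simp only [List.zip, List.zipWith, List.all_cons, Bool.and_eq_true, beq_iff_eq] at hall
            have hsr2 : sr = r := by tauto
            have hna2 : na = sb := by tauto
            have hnb2 : nb = r := by tauto
            exact hch ⟨hna2, by omega⟩
    · -- head per-step check fails: both sides false
      constructor
      · rintro ⟨⟨hA1, -⟩, -, -⟩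
        exfalso
        simp only [pvA_loop1] at hA1
        split at hA1
        · exact absurd hA1 (by simp)
        · rename_i hc
          simp only [Bool.or_eq_true, beq_iff_eq, bne_iff_ne, ne_eq, Bool.not_eq_true',
            Bool.and_eq_false_iff, decide_eq_false_iff_not, not_le, not_lt, not_or] at hc
          obtain ⟨⟨hb0, he2⟩, hsr0, hsrb⟩ := hc
          exact hstep ⟨not_not.mp he2, hsr0, hsrb⟩
      · rintro ⟨-, hall, -⟩
        exfalso
        have hqr : sq = q → sr = r → False := by
          intro h1 h2
          apply hstep
          refine ⟨?_, by omega, by omega⟩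
          rw [h1, h2]
          exact heqn
        by_cases hrz : r = 0
        · rw [if_pos hrz] at hall
          simp only [List.zip, List.zipWith, List.all_cons, Bool.and_eq_true, beq_iff_eq] at hall
          exact hqr (by tauto) (by tauto)
        · rw [if_neg hrz] at hall
          simp only [List.zip, List.zipWith, List.all_cons, Bool.and_eq_true, beq_iff_eq] at hall
          exact hqr (by tauto) (by tauto)

theorem pv_guard (c x : Bool) : (if !c then false else x) = (c && x) := by
  cases c <;> simp

theorem pv_guard_ne {m n : Nat} (x : Bool) : (if m != n then false else x) = ((m == n) && x) := by
  by_cases h : m = n <;> simp [h]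

theorem pv_bool_ext {a b : Bool} (h : a = true ↔ b = true) : a = b := by
  cases a <;> cases b <;> simp_all

-- loop1 rejects any head whose divisor is not positive
theorem pv_loop1_nonpos (x sa sb sq sr : Int) (t : List (Int × Int × Int × Int × Int))
    (h : sb ≤ 0) : pvA_loop1 ((x, sa, sb, sq, sr) :: t) = false := by
  simp only [pvA_loop1]
  rw [if_pos]
  rcases eq_or_lt_of_le h with h' | h'
  · simp [← h']
  · have h2 : (decide (0 ≤ sr) && decide (sr < sb)) = false := by
      by_cases h0 : 0 ≤ sr
      · simp only [Bool.and_eq_false_iff, decide_eq_false_iff_not, not_lt]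
        right; omega
      · simp only [Bool.and_eq_false_iff, decide_eq_false_iff_not]
        left; exact h0
    simp [h2]

-- the two validators agree on a nonempty trace whose head is anchored at (sa,sb), sb > 0
theorem pv_bridge (truth x sa sb sq sr : Int) (rest : List (Int × Int × Int × Int × Int))
    (hb : 0 < sb) :
    (if !pvA_loop1 ((x, sa, sb, sq, sr) :: rest) then false
     else if !pvA_loop2 ((x, sa, sb, sq, sr) :: rest) then false
     else ((((x, sa, sb, sq, sr) :: rest).getLastD (0, 0, 0, 0, 0)).2.2.2.2 == 0 &&
          (((x, sa, sb, sq, sr) :: rest).getLastD (0, 0, 0, 0, 0)).2.2.1 == truth))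
    = (if ((x, sa, sb, sq, sr) :: rest).length != (pvB_loop sa sb).1.length then false
       else if !((((x, sa, sb, sq, sr) :: rest).zip (pvB_loop sa sb).1).all
           (fun (s, e) => s.2.1 == e.1 && s.2.2.1 == e.2.1 && s.2.2.2.1 == e.2.2.1 && s.2.2.2.2 == e.2.2.2)) then false
       else (pvB_loop sa sb).2 == truth) := by
  have h := pv_main truth rest x sa sb sq sr hb
  rw [pv_guard, pv_guard, pv_guard_ne, pv_guard]
  apply pv_bool_ext
  simp only [Bool.and_eq_true, beq_iff_eq]
  constructor
  · rintro ⟨h1, h2, h3, h4⟩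
    obtain ⟨g1, g2, g3⟩ := h.mp ⟨⟨h1, h2⟩, h3, h4⟩
    exact ⟨g1, g2, g3⟩
  · rintro ⟨g1, g2, g3⟩
    obtain ⟨⟨h1, h2⟩, h3, h4⟩ := h.mpr ⟨g1, g2, g3⟩
    exact ⟨h1, h2, h3, h4⟩

-- ===== VERDICT (by name: the statement is the Claim_ definition above) =====
theorem euclidean_valid_spec : Claim_equal_euclidean_valid := by
  intro steps pair truth _
  unfold Spec_euclidean_valid
  cases steps with
  | nil => cases pair <;> rfl
  | cons s0 rest =>
    cases pair with
    | none => rfl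
    | some d =>
      obtain ⟨x, sa, sb, sq, sr⟩ := s0
      cases hA : List.lookup "a" d with
      | none =>
        show (if !pvA_loop1 ((x, sa, sb, sq, sr) :: rest) then false
              else if !pvA_loop2 ((x, sa, sb, sq, sr) :: rest) then false
              else match List.lookup "a" d, List.lookup "b" d with
                   | some pa, some pb =>
                     if !((sa, sb) == (max pa pb, min pa pb)) then false
                     else ((((x, sa, sb, sq, sr) :: rest).getLastD (0, 0, 0, 0, 0)).2.2.2.2 == 0 &&
                          (((x, sa, sb, sq, sr) :: rest).getLastD (0, 0, 0, 0, 0)).2.2.1 == truth)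
                   | _, _ => false)
            = (match List.lookup "a" d with
               | none => false
               | some pa =>
                 match List.lookup "b" d with
                 | none => false
                 | some pb =>
                 if min pa pb ≤ 0 then false
                 else if ((x, sa, sb, sq, sr) :: rest).length != (pvB_loop (max pa pb) (min pa pb)).1.length then false
                 else if !((((x, sa, sb, sq, sr) :: rest).zip (pvB_loop (max pa pb) (min pa pb)).1).all
                     (fun (s, e) => s.2.1 == e.1 && s.2.2.1 == e.2.1 && s.2.2.2.1 == e.2.2.1 && s.2.2.2.2 == e.2.2.2)) then false
                 else (pvB_loop (max pa pb) (min pa pb)).2 == truth)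
        rw [hA]
        cases hl1 : pvA_loop1 ((x, sa, sb, sq, sr) :: rest) <;>
          cases hl2 : pvA_loop2 ((x, sa, sb, sq, sr) :: rest) <;> simp
      | some pa =>
        cases hB : List.lookup "b" d with
        | none =>
          show (if !pvA_loop1 ((x, sa, sb, sq, sr) :: rest) then false
                else if !pvA_loop2 ((x, sa, sb, sq, sr) :: rest) then false
                else match List.lookup "a" d, List.lookup "b" d with
                     | some pa, some pb =>
                       if !((sa, sb) == (max pa pb, min pa pb)) then false
                       else ((((x, sa, sb, sq, sr) :: rest).getLastD (0, 0, 0, 0, 0)).2.2.2.2 == 0 &&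
                            (((x, sa, sb, sq, sr) :: rest).getLastD (0, 0, 0, 0, 0)).2.2.1 == truth)
                     | _, _ => false)
              = (match List.lookup "a" d with
                 | none => false
                 | some pa =>
                   match List.lookup "b" d with
                   | none => false
                   | some pb =>
                   if min pa pb ≤ 0 then false
                   else if ((x, sa, sb, sq, sr) :: rest).length != (pvB_loop (max pa pb) (min pa pb)).1.length then false
                   else if !((((x, sa, sb, sq, sr) :: rest).zip (pvB_loop (max pa pb) (min pa pb)).1).all
                       (fun (s, e) => s.2.1 == e.1 && s.2.2.1 == e.2.1 && s.2.2.2.1 == e.2.2.1 && s.2.2.2.2 == e.2.2.2)) then false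
                   else (pvB_loop (max pa pb) (min pa pb)).2 == truth)
          rw [hA, hB]
          cases hl1 : pvA_loop1 ((x, sa, sb, sq, sr) :: rest) <;>
            cases hl2 : pvA_loop2 ((x, sa, sb, sq, sr) :: rest) <;> simp
        | some pb =>
          show (if !pvA_loop1 ((x, sa, sb, sq, sr) :: rest) then false
                else if !pvA_loop2 ((x, sa, sb, sq, sr) :: rest) then false
                else match List.lookup "a" d, List.lookup "b" d with
                     | some pa, some pb =>
                       if !((sa, sb) == (max pa pb, min pa pb)) then false
                       else ((((x, sa, sb, sq, sr) :: rest).getLastD (0, 0, 0, 0, 0)).2.2.2.2 == 0 &&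
                            (((x, sa, sb, sq, sr) :: rest).getLastD (0, 0, 0, 0, 0)).2.2.1 == truth)
                     | _, _ => false)
              = (match List.lookup "a" d with
                 | none => false
                 | some pa =>
                   match List.lookup "b" d with
                   | none => false
                   | some pb =>
                   if min pa pb ≤ 0 then false
                   else if ((x, sa, sb, sq, sr) :: rest).length != (pvB_loop (max pa pb) (min pa pb)).1.length then false
                   else if !((((x, sa, sb, sq, sr) :: rest).zip (pvB_loop (max pa pb) (min pa pb)).1).all
                       (fun (s, e) => s.2.1 == e.1 && s.2.2.1 == e.2.1 && s.2.2.2.1 == e.2.2.1 && s.2.2.2.2 == e.2.2.2)) then false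
                   else (pvB_loop (max pa pb) (min pa pb)).2 == truth)
          rw [hA, hB]
          show (if !pvA_loop1 ((x, sa, sb, sq, sr) :: rest) then false
                else if !pvA_loop2 ((x, sa, sb, sq, sr) :: rest) then false
                else if !((sa, sb) == (max pa pb, min pa pb)) then false
                else ((((x, sa, sb, sq, sr) :: rest).getLastD (0, 0, 0, 0, 0)).2.2.2.2 == 0 &&
                     (((x, sa, sb, sq, sr) :: rest).getLastD (0, 0, 0, 0, 0)).2.2.1 == truth))
              = (if min pa pb ≤ 0 then false
                 else if ((x, sa, sb, sq, sr) :: rest).length != (pvB_loop (max pa pb) (min pa pb)).1.length then false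
                 else if !((((x, sa, sb, sq, sr) :: rest).zip (pvB_loop (max pa pb) (min pa pb)).1).all
                     (fun (s, e) => s.2.1 == e.1 && s.2.2.1 == e.2.1 && s.2.2.2.1 == e.2.2.1 && s.2.2.2.2 == e.2.2.2)) then false
                 else (pvB_loop (max pa pb) (min pa pb)).2 == truth)
          by_cases hhm : sa = max pa pb ∧ sb = min pa pb
          · obtain ⟨rfl, rfl⟩ := hhm
            by_cases hmin : min pa pb ≤ 0
            · rw [if_pos hmin]
              rw [pv_loop1_nonpos x (max pa pb) (min pa pb) sq sr rest hmin]
              simp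
            · rw [if_neg hmin]
              have hbr := pv_bridge truth x (max pa pb) (min pa pb) sq sr rest (by omega)
              rw [show (!((max pa pb, min pa pb) == ((max pa pb, min pa pb) : Int × Int))) = false by simp]
              rw [show (if (false : Bool) then false else
                  ((((x, max pa pb, min pa pb, sq, sr) :: rest).getLastD (0, 0, 0, 0, 0)).2.2.2.2 == 0 &&
                   (((x, max pa pb, min pa pb, sq, sr) :: rest).getLastD (0, 0, 0, 0, 0)).2.2.1 == truth))
                = ((((x, max pa pb, min pa pb, sq, sr) :: rest).getLastD (0, 0, 0, 0, 0)).2.2.2.2 == 0 &&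
                   (((x, max pa pb, min pa pb, sq, sr) :: rest).getLastD (0, 0, 0, 0, 0)).2.2.1 == truth) from rfl]
              exact hbr
          · -- head anchor mismatch: both validators reject
            have hAf : (if !pvA_loop1 ((x, sa, sb, sq, sr) :: rest) then false
                else if !pvA_loop2 ((x, sa, sb, sq, sr) :: rest) then false
                else if !((sa, sb) == (max pa pb, min pa pb)) then false
                else ((((x, sa, sb, sq, sr) :: rest).getLastD (0, 0, 0, 0, 0)).2.2.2.2 == 0 &&
                     (((x, sa, sb, sq, sr) :: rest).getLastD (0, 0, 0, 0, 0)).2.2.1 == truth)) = false := by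
              have hbeq : ((sa, sb) == (max pa pb, min pa pb) : Bool) = false := by
                simp only [beq_eq_false_iff_ne, ne_eq, Prod.mk.injEq]
                exact hhm
              cases hl1 : pvA_loop1 ((x, sa, sb, sq, sr) :: rest) <;>
                cases hl2 : pvA_loop2 ((x, sa, sb, sq, sr) :: rest) <;> simp [hbeq]
            rw [hAf]
            by_cases hmin : min pa pb ≤ 0
            · rw [if_pos hmin]
            · rw [if_neg hmin]
              obtain ⟨t2, ht2⟩ := pvB_head (max pa pb) (min pa pb) (by omega)
              rw [ht2]
              have hzip : (((x, sa, sb, sq, sr) :: rest).zip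
                  ((max pa pb, min pa pb, PySem.Int.floordiv (max pa pb) (min pa pb),
                    PySem.Int.mod (max pa pb) (min pa pb)) :: t2)).all
                  (fun (s, e) => s.2.1 == e.1 && s.2.2.1 == e.2.1 && s.2.2.2.1 == e.2.2.1 && s.2.2.2.2 == e.2.2.2) = false := by
                simp only [List.zip, List.zipWith, List.all_cons]
                rcases not_and_or.mp hhm with h | h
                · simp [h]
                · simp [h]
              rw [hzip]
              cases hlen : (((x, sa, sb, sq, sr) :: rest).length
                  != ((max pa pb, min pa pb, PySem.Int.floordiv (max pa pb) (min pa pb),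
                      PySem.Int.mod (max pa pb) (min pa pb)) :: t2).length : Bool) <;> simp
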